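-- pv_equiv track=rewrite | github.com/Haksell/codeforces | 1762C.py | smart
-- ===== SOURCE A (Python) =====
-- MOD = 998244353
--
-- def smart(n, s):
--     ext = ans = 1
--     for a, b in zip(s, s[1:]):
--         if a == b:
--             ext = 2 * ext % MOD
--         else:
--             ext = 1
--         ans += ext
--     return ans % MOD
-- ===== SOURCE B (Python) =====
-- MOD = 998244353
--
-- # B: group the string into maximal runs of equal characters, then sum the
-- # per-run closed form (2^L - 1) mod MOD, instead of A's incremental scan.
-- # Intended difference: on the empty string A returns 1 (leftover initial
-- # accumulator); B returns 0, the sum over zero runs, which is the intended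
-- # value for a string with no characters.
-- def smart(n, s):
--     runs = []
--     cnt = 0
--     prev = None
--     for ch in s:
--         if ch == prev:
--             cnt += 1
--         else:
--             if cnt:
--                 runs.append(cnt)
--             prev, cnt = ch, 1
--     if cnt:
--         runs.append(cnt)
--     return sum(pow(2, L, MOD) - 1 for L in runs) % MOD
-- ===== Notes on version B (the rewrite author's own statement) =====
-- stated objective: alternative
-- what changed: Replaces A's single incremental scan of adjacent pairs (doubling a running value inside runs) by grouping the string into maximal runs of equal characters and summing the per-run closed form pow(2, L, MOD) - 1; per-run modular pow replaces a per-character modular multiply.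
-- intended difference: On the empty string A returns 1 (its leftover initial accumulator) while B returns 0, the sum over zero runs, which is the intended count for a string with no characters. — e.g. on smart(0, ""): A returns 1, B returns 0
import Mathlib
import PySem

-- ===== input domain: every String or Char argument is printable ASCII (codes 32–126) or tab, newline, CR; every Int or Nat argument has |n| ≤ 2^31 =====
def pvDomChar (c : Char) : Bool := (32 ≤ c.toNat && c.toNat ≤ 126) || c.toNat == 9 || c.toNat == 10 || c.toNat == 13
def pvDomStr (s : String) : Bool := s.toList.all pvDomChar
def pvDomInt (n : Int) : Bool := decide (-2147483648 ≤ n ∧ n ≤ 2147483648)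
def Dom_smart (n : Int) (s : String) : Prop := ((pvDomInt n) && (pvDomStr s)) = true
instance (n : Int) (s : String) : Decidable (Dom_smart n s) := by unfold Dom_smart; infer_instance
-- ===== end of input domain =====

-- B sums the run-based closed form pow(2,L,MOD)-1 over maximal runs instead of A's incremental
-- doubling scan; on the empty string A returns 1 and B returns the intended 0.

def pvMOD : Int := 998244353

-- ===== PORT A =====
-- the loop over zip(s, s[1:]) with state (ext, ans); Python's `%` with the positive
-- modulus is PySem.Int.mod; s[1:] of a string is its character list without the head.
def smart (n : Int) (s : String) : Int :=
  let l := s.toList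
  let st := (l.zip l.tail).foldl
    (fun (st : Int × Int) (ab : Char × Char) =>
      if ab.1 == ab.2 then
        (PySem.Int.mod (2 * st.1) pvMOD, st.2 + PySem.Int.mod (2 * st.1) pvMOD)
      else (1, st.2 + 1))
    (1, 1)
  PySem.Int.mod st.2 pvMOD

-- ===== PORT B =====
-- B-side: collect the lengths of maximal runs of equal characters (the prev/cnt loop of
-- Source B; `prev = None` never matches a character, modelled by Option Char), then sum
-- pow(2, L, MOD) - 1 over them.  pow(2, L, MOD) is PySem.Int.powMod.
def pvRunStep (st : List Int × Int × Option Char) (ch : Char) : List Int × Int × Option Char :=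
  if some ch == st.2.2 then (st.1, st.2.1 + 1, st.2.2)
  else ((if st.2.1 ≠ 0 then st.1 ++ [st.2.1] else st.1), 1, some ch)

def smart_alt (n : Int) (s : String) : Int :=
  let st := s.toList.foldl pvRunStep ([], 0, none)
  let runs := if st.2.1 ≠ 0 then st.1 ++ [st.2.1] else st.1
  PySem.Int.mod ((runs.map (fun L => PySem.Int.powMod 2 L.toNat pvMOD - 1)).sum) pvMOD

-- ===== PRECONDITION & SPEC =====
-- On the empty string A returns 1 (its leftover initial accumulator) while B returns 0,
-- the sum over zero runs, which is the intended count for a string with no characters.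
def D_smart (n : Int) (s : String) : Prop := s = ""
instance (n : Int) (s : String) : Decidable (D_smart n s) := by unfold D_smart; infer_instance
def Spec_smart (n : Int) (s : String) (out : Int) : Prop := ¬ D_smart n s → out = smart_alt n s
instance (n : Int) (s : String) (out : Int) : Decidable (Spec_smart n s out) := by unfold Spec_smart; infer_instance
def pvDiffWitness_smart : Int × String := (0, "")
def pvDiffWitnessOut_smart : Int × Int := (1, 0)

-- ===== CLAIM (what is proved, stated in full; the proofs are below) =====
def Claim_unchanged_smart : Prop := ∀ (n : Int) (s : String), Dom_smart n s → Spec_smart n s (smart n s)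
def Claim_changed_smart : Prop := Dom_smart (pvDiffWitness_smart.1) (pvDiffWitness_smart.2) ∧ D_smart (pvDiffWitness_smart.1) (pvDiffWitness_smart.2) ∧ smart (pvDiffWitness_smart.1) (pvDiffWitness_smart.2) = pvDiffWitnessOut_smart.1 ∧ smart_alt (pvDiffWitness_smart.1) (pvDiffWitness_smart.2) = pvDiffWitnessOut_smart.2 ∧ pvDiffWitnessOut_smart.1 ≠ pvDiffWitnessOut_smart.2
def Claim_exact_smart : Prop := ∀ (n : Int) (s : String), Dom_smart n s → D_smart n s → smart n s ≠ smart_alt n s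

-- ===== LEMMAS AND PROOFS =====

-- A's fold over zip(l, l.tail), rewritten as a recursion carrying the previous character.
def loopA (prev : Char) (ext ans : Int) : List Char → Int
  | [] => ans
  | d :: t =>
    if prev == d then loopA d ((2 * ext) % pvMOD) (ans + (2 * ext) % pvMOD) t
    else loopA d 1 (ans + 1) t

-- run lengths of t when the current run (of character c) already holds k characters
def runsGo (c : Char) (k : Nat) : List Char → List Nat
  | [] => [k]
  | d :: t => if d == c then runsGo c (k + 1) t else k :: runsGo d 1 t

def runSum (rl : List Nat) : Int := (rl.map (fun L => (2 : Int) ^ L % pvMOD - 1)).sum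

theorem pvMOD_pos : (0 : Int) < pvMOD := by decide

theorem foldA_eq (t : List Char) : ∀ (prev : Char) (ext ans : Int),
    (((prev :: t).zip t).foldl
      (fun (st : Int × Int) (ab : Char × Char) =>
        if ab.1 == ab.2 then ((2 * st.1) % pvMOD, st.2 + (2 * st.1) % pvMOD)
        else (1, st.2 + 1)) (ext, ans)).2 = loopA prev ext ans t := by
  induction t with
  | nil => intro prev ext ans; simp [loopA]
  | cons d t ih =>
    intro prev ext ans
    simp only [List.zip_cons_cons, List.foldl_cons, loopA]
    by_cases h : prev == d
    · simp only [h, if_true]; exact ih d _ _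
    · simp only [h, if_false, Bool.false_eq_true]; exact ih d _ _

theorem loopA_modEq (t : List Char) : ∀ (prev : Char) (k : Nat) (ans : Int),
    Int.ModEq pvMOD (loopA prev ((2 : Int) ^ k % pvMOD) ans t)
      (ans + runSum (runsGo prev (k + 1) t) - ((2 : Int) ^ (k + 1) - 1)) := by
  induction t with
  | nil =>
    intro prev k ans
    have h : (2 : Int) ^ (k + 1) % pvMOD ≡ (2 : Int) ^ (k + 1) [ZMOD pvMOD] :=
      Int.emod_emod_of_dvd _ dvd_rfl
    simp only [loopA, runsGo, runSum, List.map_cons, List.map_nil, List.sum_cons,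
      List.sum_nil, add_zero]
    calc (ans : Int) = ans + ((2 : Int) ^ (k + 1) - 1) - ((2 : Int) ^ (k + 1) - 1) := by ring
      _ ≡ ans + ((2 : Int) ^ (k + 1) % pvMOD - 1) - ((2 : Int) ^ (k + 1) - 1) [ZMOD pvMOD] :=
          (((h.symm).sub_right 1).add_left ans).sub_right _
  | cons d t ih =>
    intro prev k ans
    have hpow : (2 : Int) ^ (k + 1) % pvMOD ≡ (2 : Int) ^ (k + 1) [ZMOD pvMOD] :=
      Int.emod_emod_of_dvd _ dvd_rfl
    by_cases h : prev == d
    · have hd : prev = d := eq_of_beq h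
      subst hd
      have hstep : (2 * ((2 : Int) ^ k % pvMOD)) % pvMOD = (2 : Int) ^ (k + 1) % pvMOD := by
        rw [Int.mul_emod, Int.emod_emod_of_dvd _ dvd_rfl, ← Int.mul_emod, pow_succ,
          mul_comm ((2 : Int) ^ k) 2]
      simp only [loopA, beq_self_eq_true, if_true, hstep, runsGo]
      refine (ih prev (k + 1) (ans + (2 : Int) ^ (k + 1) % pvMOD)).trans ?_
      calc ans + (2 : Int) ^ (k + 1) % pvMOD + runSum (runsGo prev (k + 1 + 1) t)
              - ((2 : Int) ^ (k + 1 + 1) - 1)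
          ≡ ans + (2 : Int) ^ (k + 1) + runSum (runsGo prev (k + 1 + 1) t)
              - ((2 : Int) ^ (k + 1 + 1) - 1) [ZMOD pvMOD] :=
            ((hpow.add_left ans).add_right _).sub_right _
        _ = ans + runSum (runsGo prev (k + 1 + 1) t) - ((2 : Int) ^ (k + 1) - 1) := by ring
    · have hd : ¬ (d == prev) = true := fun hb => h (by simp [eq_of_beq hb])
      simp only [loopA, h, if_false, Bool.false_eq_true, runsGo, hd, runSum,
        List.map_cons, List.sum_cons]
      have h0 : (1 : Int) = (2 : Int) ^ (0 : Nat) % pvMOD := by decide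
      rw [h0]
      refine (ih d 0 (ans + 1)).trans ?_
      calc ans + 1 + runSum (runsGo d (0 + 1) t) - ((2 : Int) ^ (0 + 1) - 1)
          = ans + runSum (runsGo d 1 t) := by ring
        _ = ans + (((2 : Int) ^ (k + 1) - 1) + runSum (runsGo d 1 t))
              - ((2 : Int) ^ (k + 1) - 1) := by ring
        _ ≡ ans + (((2 : Int) ^ (k + 1) % pvMOD - 1) + runSum (runsGo d 1 t))
              - ((2 : Int) ^ (k + 1) - 1) [ZMOD pvMOD] :=
            ((((hpow.symm).sub_right 1).add_right _).add_left ans).sub_right _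

-- summing Source B's per-run term over a cast run-length list is runSum
theorem sumB (rl : List Nat) :
    ((rl.map (fun (L : Nat) => (L : Int))).map
      (fun L => PySem.Int.powMod 2 L.toNat pvMOD - 1)).sum = runSum rl := by
  induction rl with
  | nil => simp [runSum]
  | cons a rl ih =>
    simp only [runSum, List.map_cons, List.sum_cons]
    rw [Int.toNat_natCast, PySem.Int.powMod_eq_emod _ _ pvMOD_pos]
    simp only [runSum] at ih
    rw [ih]

-- B's fold produces exactly the run-length list runsGo (cast to Int).
theorem foldB_eq (t : List Char) : ∀ (c : Char) (k : Nat) (acc : List Int), 0 < k →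
    (if (t.foldl pvRunStep (acc, (k : Int), some c)).2.1 ≠ 0
     then (t.foldl pvRunStep (acc, (k : Int), some c)).1
            ++ [(t.foldl pvRunStep (acc, (k : Int), some c)).2.1]
     else (t.foldl pvRunStep (acc, (k : Int), some c)).1)
      = acc ++ (runsGo c k t).map (fun (L : Nat) => (L : Int)) := by
  induction t with
  | nil =>
    intro c k acc hk
    have hkz : ((k : Int) ≠ 0) := by exact_mod_cast hk.ne'
    simp [runsGo]
    omega
  | cons d t ih =>
    intro c k acc hk
    by_cases h : d == c
    · have hd : d = c := eq_of_beq h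
      subst hd
      simp only [List.foldl_cons, pvRunStep, beq_self_eq_true,
        if_true, runsGo]
      have := ih d (k + 1) acc (by omega)
      push_cast at this ⊢
      exact this
    · have hne : ¬ (some d == some c) = true := by
        intro hb; exact h (by simpa using hb)
      have hkz : ((k : Int) ≠ 0) := by exact_mod_cast hk.ne'
      simp only [List.foldl_cons, pvRunStep, hne, if_false, Bool.false_eq_true,
        hkz, ne_eq, not_false_iff, if_true, runsGo, h, List.map_cons]
      have := ih d 1 (acc ++ [(k : Int)]) (by omega)
      push_cast at this
      rw [this, List.append_assoc]
      simp

-- ===== VERDICT (by name: the statement is the Claim_ definition above) =====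
theorem smart_spec : Claim_unchanged_smart := by
  intro n s _ hD
  have hne : s.toList ≠ [] := by
    intro h
    exact hD (by simpa [D_smart] using String.toList_inj.mp (h.trans rfl))
  obtain ⟨c, t, hl⟩ := List.exists_cons_of_ne_nil hne
  have hA : smart n s = loopA c 1 1 t % pvMOD := by
    simp only [smart, hl, List.tail_cons, PySem.Int.mod_eq_emod_of_pos pvMOD_pos]
    rw [foldA_eq]
  have hB : smart_alt n s = runSum (runsGo c 1 t) % pvMOD := by
    simp only [smart_alt, hl, List.foldl_cons, PySem.Int.mod_eq_emod_of_pos pvMOD_pos]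
    have hstep0 : pvRunStep ([], 0, none) c = ([], (1 : Int), some c) := by
      simp [pvRunStep]
    rw [hstep0]
    have hfb := foldB_eq t c 1 [] (by norm_num)
    rw [Nat.cast_one] at hfb
    rw [hfb, List.nil_append, sumB]
  rw [hA, hB]
  have h0 : (1 : Int) = (2 : Int) ^ (0 : Nat) % pvMOD := by decide
  rw [h0]
  have key : loopA c ((2 : Int) ^ (0 : Nat) % pvMOD) 1 t ≡ runSum (runsGo c 1 t) [ZMOD pvMOD] := by
    have h := loopA_modEq t c 0 1
    have : (1 : Int) + runSum (runsGo c (0 + 1) t) - ((2 : Int) ^ (0 + 1) - 1)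
        = runSum (runsGo c 1 t) := by ring
    rwa [this] at h
  exact key

theorem smart_changed : Claim_changed_smart := by
  unfold Claim_changed_smart; decide

theorem smart_tight : Claim_exact_smart := by
  intro n s _ hD
  subst hD
  simp [smart, smart_alt, PySem.Int.mod_eq_emod_of_pos pvMOD_pos]
  decide
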